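-- pv_equiv track=rewrite | github.com/HOPEAMOR/Flare-on7 | 6/deobfuscator.py | variable_name_deobfuscate
-- ===== SOURCE A (Python) =====
-- def variable_name_deobfuscate(data):
--     variable_names_dict = {
--         "FLVBURIUYD": "file_size",
--         "FLNFUFVECT": "file_data_struct",
--         "FLXMDCHRQD": "file_data_and_size_struct",
--         "FLQGWNZJZC": "struct_incrementer",
--         "FLTERGXSKH": "computername_incrementer",
--         "FLTAJBYKXX": "inner_for_decrementer",
--         "FLYDTVGPNC": "computername_character",
--         "FLOCTXPGQH": "out_string",
--         "FLKQAOVZEC": "computername_struct",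
--         "FLISILAYLNRAW": "computername_struct",
--         "FLMTVYZRSY": "key_blob_struct",
--         "FLKPZLQKCH": "encrypted_blob",
--         "FLUELRPEAX": "encrypted_content_struct",
--         "FLFZFSUAOZ": "beginning_delimiter",
--         "FLTVWQDOTG": "end_delimiter",
--         "FLODIUTPUY": "qr_code_struct",
--         "FLNPAPEKEN": "qr_code_struct",
--         "FLSEKBKMRU": "decrypted_qr_flag",
--         "FLNTTMJFEA": "hash_struct",
--         "FLPNLTLQHH": "random_string",
--         "FLBVOKDXKG": "bitmap_struct",
--         "FLFWEZDBYC": "file_descriptor"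
--     }
--
--     for ob_name,deob_name in variable_names_dict.items():
--         data = data.replace(ob_name,deob_name)
--
--     return data
-- ===== SOURCE B (Python) =====
-- def variable_name_deobfuscate(data):
--     # Every obfuscated name is "FL" + an 8- or 11-character uppercase suffix, so a
--     # single left-to-right pass with two hash lookups per "FL" occurrence replaces
--     # A's 22 sequential full-string replace passes (correct: no name overlaps
--     # another and the replacement texts contain no uppercase, so they never form
--     # new names).
--     suffix8 = {
--         "VBURIUYD": "file_size",
--         "NFUFVECT": "file_data_struct",
--         "XMDCHRQD": "file_data_and_size_struct",
--         "QGWNZJZC": "struct_incrementer",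
--         "TERGXSKH": "computername_incrementer",
--         "TAJBYKXX": "inner_for_decrementer",
--         "YDTVGPNC": "computername_character",
--         "OCTXPGQH": "out_string",
--         "KQAOVZEC": "computername_struct",
--         "MTVYZRSY": "key_blob_struct",
--         "KPZLQKCH": "encrypted_blob",
--         "UELRPEAX": "encrypted_content_struct",
--         "FZFSUAOZ": "beginning_delimiter",
--         "TVWQDOTG": "end_delimiter",
--         "ODIUTPUY": "qr_code_struct",
--         "NPAPEKEN": "qr_code_struct",
--         "SEKBKMRU": "decrypted_qr_flag",
--         "NTTMJFEA": "hash_struct",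
--         "PNLTLQHH": "random_string",
--         "BVOKDXKG": "bitmap_struct",
--         "FWEZDBYC": "file_descriptor",
--     }
--     suffix11 = {"ISILAYLNRAW": "computername_struct"}
--     out = []
--     i = 0
--     n = len(data)
--     while i < n:
--         if data.startswith("FL", i):
--             name = suffix8.get(data[i + 2:i + 10])
--             if name is not None:
--                 out.append(name)
--                 i += 10
--                 continue
--             name = suffix11.get(data[i + 2:i + 13])
--             if name is not None:
--                 out.append(name)
--                 i += 13
--                 continue
--         out.append(data[i])
--         i += 1
--     return "".join(out)
-- ===== Notes on version B (the rewrite author's own statement) =====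
-- stated objective: alternative
-- what changed: A rewrites the whole string 22 times, once per dict entry; B makes a single left-to-right pass that, at each occurrence of the two-character prefix shared by all obfuscated names, hash-looks-up the following 8- or 11-character suffix in two suffix dictionaries (correct because no obfuscated name overlaps another and the replacement texts contain no uppercase, so they never form new names).
import Mathlib
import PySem

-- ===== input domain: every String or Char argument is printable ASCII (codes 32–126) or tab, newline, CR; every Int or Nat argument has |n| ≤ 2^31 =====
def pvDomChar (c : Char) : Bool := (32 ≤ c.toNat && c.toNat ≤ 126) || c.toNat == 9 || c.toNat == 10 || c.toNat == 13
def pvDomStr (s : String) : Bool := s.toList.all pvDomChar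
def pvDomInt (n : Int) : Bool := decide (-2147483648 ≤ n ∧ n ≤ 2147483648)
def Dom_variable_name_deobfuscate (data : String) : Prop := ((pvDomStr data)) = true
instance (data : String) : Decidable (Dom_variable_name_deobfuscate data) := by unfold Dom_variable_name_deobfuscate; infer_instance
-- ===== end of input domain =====

-- B replaces A's 22 sequential full-string replace passes by ONE left-to-right scan that, at each
-- "FL" occurrence, hash-looks-up the following 8- or 11-character suffix (objective: alternative —
-- the string is traversed once, with two dictionary lookups instead of a 22-name scan per position).

-- ===== PORT A =====
-- the Python dict literal of A, in insertion order
def obTable : List (String × String) := [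
  ("FLVBURIUYD", "file_size"),
  ("FLNFUFVECT", "file_data_struct"),
  ("FLXMDCHRQD", "file_data_and_size_struct"),
  ("FLQGWNZJZC", "struct_incrementer"),
  ("FLTERGXSKH", "computername_incrementer"),
  ("FLTAJBYKXX", "inner_for_decrementer"),
  ("FLYDTVGPNC", "computername_character"),
  ("FLOCTXPGQH", "out_string"),
  ("FLKQAOVZEC", "computername_struct"),
  ("FLISILAYLNRAW", "computername_struct"),
  ("FLMTVYZRSY", "key_blob_struct"),
  ("FLKPZLQKCH", "encrypted_blob"),
  ("FLUELRPEAX", "encrypted_content_struct"),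
  ("FLFZFSUAOZ", "beginning_delimiter"),
  ("FLTVWQDOTG", "end_delimiter"),
  ("FLODIUTPUY", "qr_code_struct"),
  ("FLNPAPEKEN", "qr_code_struct"),
  ("FLSEKBKMRU", "decrypted_qr_flag"),
  ("FLNTTMJFEA", "hash_struct"),
  ("FLPNLTLQHH", "random_string"),
  ("FLBVOKDXKG", "bitmap_struct"),
  ("FLFWEZDBYC", "file_descriptor")]

-- for ob_name, deob_name in variable_names_dict.items(): data = data.replace(ob_name, deob_name)
def variable_name_deobfuscate (data : String) : String :=
  obTable.foldl (fun d p => PySem.Str.replace d p.1 p.2) data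

-- ===== PORT B =====
-- Source B's suffix8 dict: the suffix after "FL" of every 10-character obfuscated name
def d8 : PySem.Dict String String := PySem.Dict.ofList [
  ("VBURIUYD", "file_size"),
  ("NFUFVECT", "file_data_struct"),
  ("XMDCHRQD", "file_data_and_size_struct"),
  ("QGWNZJZC", "struct_incrementer"),
  ("TERGXSKH", "computername_incrementer"),
  ("TAJBYKXX", "inner_for_decrementer"),
  ("YDTVGPNC", "computername_character"),
  ("OCTXPGQH", "out_string"),
  ("KQAOVZEC", "computername_struct"),
  ("MTVYZRSY", "key_blob_struct"),
  ("KPZLQKCH", "encrypted_blob"),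
  ("UELRPEAX", "encrypted_content_struct"),
  ("FZFSUAOZ", "beginning_delimiter"),
  ("TVWQDOTG", "end_delimiter"),
  ("ODIUTPUY", "qr_code_struct"),
  ("NPAPEKEN", "qr_code_struct"),
  ("SEKBKMRU", "decrypted_qr_flag"),
  ("NTTMJFEA", "hash_struct"),
  ("PNLTLQHH", "random_string"),
  ("BVOKDXKG", "bitmap_struct"),
  ("FWEZDBYC", "file_descriptor")]
-- Source B's suffix11 dict: the suffix after "FL" of the single 13-character name
def d11 : PySem.Dict String String := PySem.Dict.ofList [("ISILAYLNRAW", "computername_struct")]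

-- the "while i < n" scan over the remaining characters: data.startswith("FL", i) is the two head
-- checks (exact: a character-by-character reading of the Python test), the slices data[i+2:i+10] /
-- data[i+2:i+13] are take 8 / take 11 of the list after them, i += 10/13/1 drops as many characters
def scanB : List Char → List Char
  | [] => []
  | c :: t =>
    if c = 'F' ∧ t.head? = some 'L' then
      match PySem.Dict.get? d8 (String.ofList (t.tail.take 8)) with
      | some v => v.toList ++ scanB (t.drop 9)
      | none =>
        match PySem.Dict.get? d11 (String.ofList (t.tail.take 11)) with
        | some v => v.toList ++ scanB (t.drop 12)
        | none => c :: scanB t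
    else c :: scanB t
termination_by l => l.length
decreasing_by all_goals (simp; try omega)

def variable_name_deobfuscate_alt (data : String) : String :=
  String.ofList (scanB data.toList)

-- ===== PRECONDITION & SPEC =====
def Spec_variable_name_deobfuscate (data : String) (out : String) : Prop := out = variable_name_deobfuscate_alt data
instance (data : String) (out : String) : Decidable (Spec_variable_name_deobfuscate data out) := by unfold Spec_variable_name_deobfuscate; infer_instance

-- ===== CLAIM (what is proved, stated in full; the proofs are below) =====
def Claim_equal_variable_name_deobfuscate : Prop := ∀ (data : String), Dom_variable_name_deobfuscate data → Spec_variable_name_deobfuscate data (variable_name_deobfuscate data)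

-- ===== LEMMAS AND PROOFS =====

-- A's table with the strings as character lists (proof-side view of obTable)
def obTableC : List (List Char × List Char) :=
  obTable.map (fun p => (p.1.toList, p.2.toList))

-- one replace pass, on character lists (Python's str.replace for a non-empty pattern)
def repl (old new : List Char) : List Char → List Char
  | [] => []
  | c :: t =>
      if old.isPrefixOf (c :: t) then new ++ repl old new ((c :: t).drop (old.length.max 1))
      else c :: repl old new t
termination_by l => l.length
decreasing_by
  all_goals (simp; try omega)

def isUp (c : Char) : Bool := decide ('A' ≤ c) && decide (c ≤ 'Z')

theorem prefix_append_cases {κ x r : List Char} (h : κ <+: x ++ r) : κ <+: x ∨ x <+: κ :=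
  (List.prefix_or_prefix_of_prefix h (List.prefix_append x r))

theorem repl_skip (k' v' : List Char) :
    ∀ x r, (∀ o < x.length, ¬ k' <+: x.drop o ∧ ¬ x.drop o <+: k') →
      repl k' v' (x ++ r) = x ++ repl k' v' r := by
  intro x
  induction x with
  | nil => intro r _; simp
  | cons a x' ih =>
      intro r h
      have h0 := h 0 (by simp)
      simp only [List.drop_zero] at h0
      have hnp : ¬ k'.isPrefixOf ((a :: x') ++ r) := by
        intro hp
        rcases prefix_append_cases (List.isPrefixOf_iff_prefix.mp hp) with h1 | h1
        · exact h0.1 h1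
        · exact h0.2 h1
      rw [List.cons_append, repl]
      rw [if_neg (by simpa using hnp)]
      have := ih r (fun o ho => by simpa using h (o + 1) (by simp; omega))
      simp [this]

theorem repl_head (k v r : List Char) (hk : k ≠ []) :
    repl k v (k ++ r) = v ++ repl k v r := by
  cases k with
  | nil => exact absurd rfl hk
  | cons a t =>
      rw [List.cons_append, repl]
      have hp : (a :: t).isPrefixOf (a :: (t ++ r)) := by
        rw [List.isPrefixOf_iff_prefix, List.cons_prefix_cons]
        exact ⟨rfl, List.prefix_append t r⟩
      rw [if_pos hp]
      have hmax : ((a :: t).length.max 1) = t.length + 1 := by simp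
      rw [hmax]
      simp

theorem no_create (k' v' : List Char) (hv : v' ≠ []) (hvl : v'.all (fun c => !isUp c) = true) :
    ∀ w x, x ≠ [] → x.all isUp = true → ¬ x <+: w → ¬ x <+: repl k' v' w := by
  intro w
  induction w with
  | nil =>
    intro x hx hxu hxw hcontra
    rw [repl] at hcontra; exact hx (List.prefix_nil.mp hcontra)
  | cons c t ihw =>
    intro x hx hxu hxw hcontra
    by_cases hp : k'.isPrefixOf (c :: t)
    · rw [repl, if_pos hp] at hcontra
      cases x with
      | nil => exact hx rfl
      | cons x₀ xs =>
        cases hvc : v' with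
        | nil => exact hv hvc
        | cons b bs =>
          rw [hvc, List.cons_append, List.cons_prefix_cons] at hcontra
          have hup : isUp x₀ = true := by simp [List.all_cons] at hxu; exact hxu.1
          have hnup : isUp b = false := by rw [hvc] at hvl; simp [List.all_cons] at hvl; simpa using hvl.1
          rw [hcontra.1] at hup; rw [hup] at hnup; exact absurd hnup (by simp)
    · rw [repl, if_neg hp] at hcontra
      cases x with
      | nil => exact hx rfl
      | cons x₀ xs =>
        rw [List.cons_prefix_cons] at hcontra
        obtain ⟨he, hxs⟩ := hcontra
        cases xs with
        | nil => exact hxw (by rw [he]; simp)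
        | cons y ys =>
          have hxst : ¬ (y :: ys) <+: t := by
            intro hq; exact hxw (by rw [he]; exact List.cons_prefix_cons.mpr ⟨rfl, hq⟩)
          exact ihw (y :: ys) (by simp) (by simp [List.all_cons] at hxu ⊢; exact hxu.2) hxst hxs

def goodPair (p : List Char × List Char) : Bool :=
  !p.1.isEmpty && p.1.all isUp && !p.2.isEmpty && p.2.all (fun c => !isUp c)

theorem heads_ne_not_prefix {a b : Char} {l₁ l₂ : List Char} (h : a ≠ b) :
    ¬ (a :: l₁) <+: (b :: l₂) := by
  intro hp; exact h (List.cons_prefix_cons.mp hp).1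

theorem foldl_repl_nil (tbl : List (List Char × List Char)) :
    tbl.foldl (fun d p => repl p.1 p.2 d) [] = [] := by
  induction tbl with
  | nil => rfl
  | cons p rest ih => simp only [List.foldl_cons]; rw [repl]; exact ih

theorem foldl_no_match (tbl : List (List Char × List Char))
    (hg : ∀ p ∈ tbl, goodPair p = true) (c : Char) :
    ∀ t, (∀ p ∈ tbl, ¬ p.1 <+: c :: t) →
    tbl.foldl (fun d p => repl p.1 p.2 d) (c :: t)
      = c :: tbl.foldl (fun d p => repl p.1 p.2 d) t := by
  induction tbl with
  | nil => intro t _; rfl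
  | cons p rest ih =>
      intro t hnm
      have hgp := hg p (by simp)
      have hp1ne : p.1 ≠ [] := by
        simp [goodPair] at hgp; intro h; rw [h] at hgp; simp at hgp
      have hstep : repl p.1 p.2 (c :: t) = c :: repl p.1 p.2 t := by
        rw [repl, if_neg]
        intro hq
        exact hnm p (by simp) (List.isPrefixOf_iff_prefix.mp hq)
      simp only [List.foldl_cons]
      rw [hstep]
      apply ih (fun q hq => hg q (by simp [hq])) (repl p.1 p.2 t)
      intro q hq hcon
      have hgq := hg q (by simp [hq])
      have hq1 : q.1 ≠ [] ∧ q.1.all isUp = true := by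
        simp [goodPair] at hgq
        exact ⟨by intro h; rw [h] at hgq; simp at hgq, by
          rcases hgq with ⟨⟨⟨_, h2⟩, _⟩, _⟩; exact List.all_eq_true.mpr h2⟩
      cases hqc : q.1 with
      | nil => exact hq1.1 hqc
      | cons x₀ xs =>
          rw [hqc, List.cons_prefix_cons] at hcon
          obtain ⟨he, hxs⟩ := hcon
          cases xs with
          | nil =>
              exact hnm q (by simp [hq]) (by rw [hqc, he]; simp)
          | cons y ys =>
              have hvne : p.2 ≠ [] := by
                simp [goodPair] at hgp; intro h; rw [h] at hgp; simp at hgp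
              have hvl : p.2.all (fun ch => !isUp ch) = true := by
                simp [goodPair] at hgp; rcases hgp with ⟨_, h4⟩
                simpa using h4
              have hxst : ¬ (y :: ys) <+: t := by
                intro hz
                exact hnm q (by simp [hq]) (by rw [hqc, he]; exact List.cons_prefix_cons.mpr ⟨rfl, hz⟩)
              have hup : (y :: ys).all isUp = true := by
                have := hq1.2; rw [hqc] at this; simp [List.all_cons] at this ⊢
                exact this.2
              exact no_create p.1 p.2 hvne hvl t (y :: ys) (by simp) hup hxst hxs

theorem foldl_skip_block (x : List Char) :
    ∀ (tbl : List (List Char × List Char)) (r : List Char),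
      (∀ p ∈ tbl, ∀ o < x.length, ¬ p.1 <+: x.drop o ∧ ¬ x.drop o <+: p.1) →
    tbl.foldl (fun d p => repl p.1 p.2 d) (x ++ r)
      = x ++ tbl.foldl (fun d p => repl p.1 p.2 d) r := by
  intro tbl
  induction tbl with
  | nil => intro r _; rfl
  | cons p rest ih =>
      intro r h
      simp only [List.foldl_cons]
      rw [repl_skip p.1 p.2 x r (h p (by simp))]
      exact ih (repl p.1 p.2 r) (fun q hq => h q (by simp [hq]))

theorem good_block_skip (v : List Char) (hvl : v.all (fun c => !isUp c) = true)
    (q : List Char × List Char) (hgq : goodPair q = true) :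
    ∀ o < v.length, ¬ q.1 <+: v.drop o ∧ ¬ v.drop o <+: q.1 := by
  intro o ho
  have hdrop : v.drop o = v[o] :: v.drop (o + 1) := List.drop_eq_getElem_cons ho
  have hnu : isUp v[o] = false := by
    have := List.all_eq_true.mp hvl v[o] (List.getElem_mem ho)
    simpa using this
  have hq1 : q.1 ≠ [] ∧ q.1.all isUp = true := by
    simp [goodPair] at hgq
    exact ⟨by intro h; rw [h] at hgq; simp at hgq, by
      rcases hgq with ⟨⟨⟨_, h2⟩, _⟩, _⟩; exact List.all_eq_true.mpr h2⟩
  cases hqc : q.1 with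
  | nil => exact absurd hqc hq1.1
  | cons u us =>
      have hu : isUp u = true := by
        have := hq1.2; rw [hqc] at this; simp [List.all_cons] at this; exact this.1
      have hne : u ≠ v[o] := by intro h; rw [h] at hu; rw [hu] at hnu; simp at hnu
      rw [hdrop]
      exact ⟨heads_ne_not_prefix hne, heads_ne_not_prefix (fun h => hne h.symm)⟩

theorem foldl_match (tbl₁ tbl₂ : List (List Char × List Char)) (k v r : List Char)
    (hg : ∀ p ∈ tbl₁ ++ (k, v) :: tbl₂, goodPair p = true)
    (hcomp : ∀ p ∈ tbl₁ ++ (k, v) :: tbl₂, ∀ o < k.length,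
        (o = 0 ∧ p.1 = k) ∨ (¬ p.1 <+: k.drop o ∧ ¬ k.drop o <+: p.1))
    (hpre : ∀ p ∈ tbl₁, ¬ p.1 <+: k ++ r) :
    (tbl₁ ++ (k, v) :: tbl₂).foldl (fun d p => repl p.1 p.2 d) (k ++ r)
      = v ++ (tbl₁ ++ (k, v) :: tbl₂).foldl (fun d p => repl p.1 p.2 d) r := by
  have hgk := hg (k, v) (by simp)
  have hkne : k ≠ [] := by
    simp [goodPair] at hgk; intro h; rw [h] at hgk; simp at hgk
  have hvl : v.all (fun c => !isUp c) = true := by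
    simp [goodPair] at hgk; rcases hgk with ⟨_, h4⟩; simpa using h4
  have hskip1 : ∀ p ∈ tbl₁, ∀ o < k.length, ¬ p.1 <+: k.drop o ∧ ¬ k.drop o <+: p.1 := by
    intro p hp o ho
    rcases hcomp p (by simp [hp]) o ho with ⟨_, hpk⟩ | h
    · exfalso
      exact hpre p hp (by rw [hpk]; exact List.prefix_append k r)
    · exact h
  rw [List.foldl_append, List.foldl_append]
  rw [foldl_skip_block k tbl₁ r hskip1]
  simp only [List.foldl_cons]
  rw [repl_head k v _ hkne]
  rw [foldl_skip_block v tbl₂ _ (fun q hq => good_block_skip v hvl q (hg q (by simp [hq])))]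

theorem table_good : ∀ p ∈ obTableC, goodPair p = true := by decide

theorem table_comp : ∀ q ∈ obTableC, ∀ p ∈ obTableC, ∀ o < q.1.length,
    (o = 0 ∧ p.1 = q.1) ∨ (¬ p.1 <+: q.1.drop o ∧ ¬ q.1.drop o <+: p.1) := by decide

-- distinct table keys are never prefixes of one another
theorem table_prefix_eq : ∀ p ∈ obTableC, ∀ q ∈ obTableC, p.1 <+: q.1 → p.1 = q.1 := by
  intro p hp q hq hpre
  rcases table_comp q hq p hp 0 (by
    have := table_good q hq
    simp [goodPair] at this
    cases hq1 : q.1 with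
    | nil => rw [hq1] at this; simp at this
    | cons a t => simp) with ⟨_, h⟩ | ⟨h, _⟩
  · exact h
  · simp only [List.drop_zero] at h; exact absurd hpre h

theorem table_keys_nodup : (obTableC.map Prod.fst).Nodup := by decide

-- the one fold step a matched table entry performs, for ANY occurrence of its key
theorem foldl_match_mem (k v r : List Char) (hmem : (k, v) ∈ obTableC) :
    obTableC.foldl (fun d p => repl p.1 p.2 d) (k ++ r)
      = v ++ obTableC.foldl (fun d p => repl p.1 p.2 d) r := by
  obtain ⟨t1, t2, heq⟩ := List.append_of_mem hmem
  have hnd := table_keys_nodup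
  rw [heq, List.map_append, List.map_cons] at hnd
  have h2 := List.nodup_middle.mp hnd
  have hknot : k ∉ t1.map Prod.fst := fun h => (List.nodup_cons.mp h2).1 (List.mem_append_left _ h)
  have hpre : ∀ p ∈ t1, ¬ p.1 <+: k ++ r := by
    intro p hp hcon
    have hpmem : p ∈ obTableC := by rw [heq]; simp [hp]
    have hkmem : (k, v) ∈ obTableC := hmem
    have hpk : p.1 = k := by
      rcases prefix_append_cases hcon with h | h
      · exact table_prefix_eq p hpmem (k, v) hkmem h
      · exact (table_prefix_eq (k, v) hkmem p hpmem h).symm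
    exact hknot (by rw [← hpk]; exact List.mem_map_of_mem hp)
  rw [heq]
  exact foldl_match t1 t2 k v r
    (fun p hp => table_good p (heq ▸ hp))
    (fun p hp => table_comp (k, v) hmem p (heq ▸ hp))
    hpre

-- every d8/d11 entry names a table entry (with "FL" in front), and its suffix length
theorem mem_d8_table : ∀ p ∈ (PySem.Dict.items d8),
    ('F' :: 'L' :: p.1.toList, p.2.toList) ∈ obTableC := by decide

theorem mem_d11_table : ∀ p ∈ (PySem.Dict.items d11),
    ('F' :: 'L' :: p.1.toList, p.2.toList) ∈ obTableC := by decide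

-- every table key is "FL" + a suffix that is a key of d8 (length 8) or of d11 (length 11)
theorem table_covered : ∀ p ∈ obTableC, p.1.take 2 = ['F', 'L'] ∧
    ((p.1.drop 2).length = 8 ∧ String.ofList (p.1.drop 2) ∈ PySem.Dict.keys d8
      ∨ (p.1.drop 2).length = 11 ∧ String.ofList (p.1.drop 2) ∈ PySem.Dict.keys d11) := by decide

-- the main induction: A's 22 replace passes compute exactly B's single scan
theorem main_eq : ∀ n, ∀ l : List Char, l.length ≤ n →
    obTableC.foldl (fun d p => repl p.1 p.2 d) l = scanB l := by
  intro n
  induction n with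
  | zero =>
      intro l hl
      have : l = [] := by cases l <;> simp_all
      subst this
      rw [foldl_repl_nil, scanB]
  | succ n ih =>
      intro l hl
      cases l with
      | nil => rw [foldl_repl_nil, scanB]
      | cons c t =>
        by_cases hFL : c = 'F' ∧ t.head? = some 'L'
        · obtain ⟨hc, hh⟩ := hFL
          subst hc
          cases t with
          | nil => simp at hh
          | cons d tt =>
            have hd : d = 'L' := by simpa using hh
            subst hd
            cases h8 : PySem.Dict.get? d8 (String.ofList (tt.take 8)) with
            | some v =>
                have hmem := PySem.Dict.mem_items_of_get?_eq_some d8 h8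
                have hb := mem_d8_table _ hmem
                simp only [String.toList_ofList] at hb
                have hsplit : ('F' :: 'L' :: tt : List Char)
                    = ('F' :: 'L' :: tt.take 8) ++ tt.drop 8 := by simp
                conv_lhs => rw [hsplit]
                rw [foldl_match_mem _ _ _ hb]
                rw [ih (tt.drop 8) (by simp at hl ⊢; omega)]
                conv_rhs => rw [scanB.eq_def]
                simp [h8]
            | none =>
              cases h11 : PySem.Dict.get? d11 (String.ofList (tt.take 11)) with
              | some v =>
                  have hmem := PySem.Dict.mem_items_of_get?_eq_some d11 h11
                  have hb := mem_d11_table _ hmem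
                  simp only [String.toList_ofList] at hb
                  have hsplit : ('F' :: 'L' :: tt : List Char)
                      = ('F' :: 'L' :: tt.take 11) ++ tt.drop 11 := by simp
                  conv_lhs => rw [hsplit]
                  rw [foldl_match_mem _ _ _ hb]
                  rw [ih (tt.drop 11) (by simp at hl ⊢; omega)]
                  conv_rhs => rw [scanB.eq_def]
                  simp [h8, h11]
              | none =>
                  have hnone : ∀ p ∈ obTableC, ¬ p.1 <+: 'F' :: 'L' :: tt := by
                    intro p hp hcon
                    obtain ⟨htake, hdisj⟩ := table_covered p hp
                    have hform : p.1 = 'F' :: 'L' :: p.1.drop 2 := by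
                      conv_lhs => rw [← List.take_append_drop 2 p.1]
                      rw [htake]; rfl
                    rw [hform] at hcon
                    have hsfx : p.1.drop 2 <+: tt :=
                      (List.cons_prefix_cons.mp (List.cons_prefix_cons.mp hcon).2).2
                    rcases hdisj with ⟨hlen, hk⟩ | ⟨hlen, hk⟩
                    · have heq8 : p.1.drop 2 = tt.take 8 := by
                        have := List.prefix_iff_eq_take.mp hsfx
                        rw [hlen] at this; exact this
                      rw [heq8] at hk
                      exact ((PySem.Dict.get?_eq_none_iff_not_mem_keys _ _).mp h8) hk
                    · have heq11 : p.1.drop 2 = tt.take 11 := by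
                        have := List.prefix_iff_eq_take.mp hsfx
                        rw [hlen] at this; exact this
                      rw [heq11] at hk
                      exact ((PySem.Dict.get?_eq_none_iff_not_mem_keys _ _).mp h11) hk
                  rw [foldl_no_match obTableC table_good _ _ hnone]
                  rw [ih ('L' :: tt) (by simp at hl ⊢; omega)]
                  conv_rhs => rw [scanB.eq_def]
                  simp [h8, h11]
        · have hnone : ∀ p ∈ obTableC, ¬ p.1 <+: c :: t := by
            intro p hp hcon
            obtain ⟨htake, _⟩ := table_covered p hp
            have hform : p.1 = 'F' :: 'L' :: p.1.drop 2 := by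
              conv_lhs => rw [← List.take_append_drop 2 p.1]
              rw [htake]; rfl
            rw [hform] at hcon
            have hc : c = 'F' := ((List.cons_prefix_cons.mp hcon).1).symm
            have ht : ('L' :: p.1.drop 2) <+: t := (List.cons_prefix_cons.mp hcon).2
            cases t with
            | nil => simp at ht
            | cons d tt =>
                have hd : d = 'L' := ((List.cons_prefix_cons.mp ht).1).symm
                exact hFL ⟨hc, by simp [hd]⟩
          rw [foldl_no_match obTableC table_good _ _ hnone]
          rw [ih t (by simp at hl ⊢; omega)]
          rw [scanB, if_neg hFL]

-- Python's str.replace (non-empty pattern) is the one-pass repl above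
theorem go_eq_repl (old new : List Char) (hold : old ≠ []) :
    ∀ fuel l acc, l.length ≤ fuel →
      PySem.Chars.replace.go old new fuel l acc = acc.reverse ++ repl old new l := by
  intro fuel
  induction fuel with
  | zero =>
      intro l acc hl
      have : l = [] := by cases l <;> simp_all
      subst this
      rw [PySem.Chars.replace.go, repl]
  | succ n ih =>
      intro l acc hl
      cases l with
      | nil => rw [PySem.Chars.replace.go, repl] <;> simp
      | cons c t =>
          by_cases hp : old.isPrefixOf (c :: t)
          · rw [PySem.Chars.replace.go]
            simp only [hp, if_pos]
            have hpre : old <+: c :: t := List.isPrefixOf_iff_prefix.mp hp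
            have h1 : 1 ≤ old.length := by cases old <;> simp_all
            have hle : old.length ≤ t.length + 1 := by simpa using hpre.length_le
            have hl' : t.length + 1 ≤ n + 1 := by simpa using hl
            rw [ih ((c :: t).drop old.length) (new.reverse ++ acc) (by simp; omega)]
            rw [repl]
            simp [hp, Nat.max_eq_left h1]
          · rw [PySem.Chars.replace.go]
            simp only [hp, if_neg, Bool.false_eq_true, not_false_iff]
            rw [ih t (c :: acc) (by simpa using Nat.le_of_succ_le_succ (by simpa using hl))]
            rw [repl]
            simp [hp]

theorem replace_eq_repl (old new l : List Char) (hold : old ≠ []) :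
    PySem.Chars.replace l old new = repl old new l := by
  rw [PySem.Chars.replace]
  have : old.isEmpty = false := by cases old <;> simp_all
  rw [this]
  simpa using go_eq_repl old new hold l.length l [] le_rfl

theorem fold_str_toList :
    ∀ (tbl : List (String × String)) (s : String), (∀ p ∈ tbl, p.1.toList ≠ []) →
    (tbl.foldl (fun d p => PySem.Str.replace d p.1 p.2) s).toList
      = (tbl.map (fun p => (p.1.toList, p.2.toList))).foldl (fun d q => repl q.1 q.2 d) s.toList := by
  intro tbl
  induction tbl with
  | nil => intro s _; rfl
  | cons p rest ih =>
      intro s hk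
      simp only [List.foldl_cons, List.map_cons]
      rw [ih _ (fun q hq => hk q (by simp [hq]))]
      congr 1
      rw [PySem.Str.replace]
      rw [String.toList_ofList]
      exact replace_eq_repl _ _ _ (hk p (by simp))

theorem A_toList (data : String) :
    (variable_name_deobfuscate data).toList
      = obTableC.foldl (fun d p => repl p.1 p.2 d) data.toList := by
  rw [variable_name_deobfuscate, obTableC]
  exact fold_str_toList obTable data (by decide)

-- ===== VERDICT (by name: the statement is the Claim_ definition above) =====
theorem variable_name_deobfuscate_spec : Claim_equal_variable_name_deobfuscate := by
  intro data _
  unfold Spec_variable_name_deobfuscate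
  have h1 := A_toList data
  rw [main_eq data.toList.length data.toList le_rfl] at h1
  have h2 : (variable_name_deobfuscate_alt data).toList = scanB data.toList := by
    rw [variable_name_deobfuscate_alt, String.toList_ofList]
  exact String.toList_inj.mp (by rw [h1, h2])
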